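-- pv_equiv track=rewrite | github.com/CmdrPrompt/MetricMancer | src/app/repository_grouper.py | group_by_repository
-- ===== SOURCE A (Python) =====
-- from collections import defaultdict
-- from typing import List, Dict, Set, Tuple
--
-- def group_by_repository(files: List[dict]) -> Tuple[Dict[str, List[dict]], Dict[str, Set[str]]]:
--     """
--     Groups files by their repository root directory.
--
--     Takes a list of file dictionaries and organizes them by their
--     'root' field. Also tracks the scan directories (currently just
--     the root itself) for each repository.
--
--     Args:
--         files: List of file dictionaries. Each file should have:
--                - 'path': Full path to the file
--                - 'root': Repository root path (optional, defaults to '')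
--                - Any other metadata is preserved
--
--     Returns:
--         Tuple containing:
--         - files_by_root: Dictionary mapping repository root to list of files
--         - scan_dirs_by_root: Dictionary mapping repository root to set of scan directories
--
--     Example:
--         >>> grouper = RepositoryGrouper()
--         >>> files = [
--         ...     {'path': '/repo/src/file1.py', 'root': '/repo'},
--         ...     {'path': '/repo/src/file2.py', 'root': '/repo'}
--         ... ]
--         >>> files_by_root, scan_dirs = grouper.group_by_repository(files)
--         >>> files_by_root['/repo']
--         [{'path': '/repo/src/file1.py', 'root': '/repo'}, ...]
--     """
--     files_by_root = defaultdict(list)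
--     scan_dirs_by_root = defaultdict(set)
--
--     for file in files:
--         # Get repository root, default to empty string if not present
--         repo_root = file.get('root', '')
--
--         # Add file to the appropriate repository group
--         files_by_root[repo_root].append(file)
--
--         # Track this repository root as a scan directory
--         scan_dirs_by_root[repo_root].add(repo_root)
--
--     # Convert defaultdicts to regular dicts for cleaner API
--     return dict(files_by_root), dict(scan_dirs_by_root)
-- ===== SOURCE B (Python) =====
-- def group_by_repository(files):
--     # Two-stage: dedup the roots first (first-occurrence order), then build each
--     # group by filtering the file list per root; no dict accumulation at all.
--     roots = list(dict.fromkeys(f.get('root', '') for f in files))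
--     files_by_root = {r: [f for f in files if f.get('root', '') == r] for r in roots}
--     scan_dirs_by_root = {r: {r} for r in roots}
--     return files_by_root, scan_dirs_by_root
-- ===== Notes on version B (the rewrite author's own statement) =====
-- stated objective: alternative
-- what changed: B replaces A's single accumulating pass over two defaultdicts with a two-stage algorithm: dedup the distinct roots first, then construct each group by filtering the whole file list per root, and derive the scan-dir dict directly from the root list.
import Mathlib
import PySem

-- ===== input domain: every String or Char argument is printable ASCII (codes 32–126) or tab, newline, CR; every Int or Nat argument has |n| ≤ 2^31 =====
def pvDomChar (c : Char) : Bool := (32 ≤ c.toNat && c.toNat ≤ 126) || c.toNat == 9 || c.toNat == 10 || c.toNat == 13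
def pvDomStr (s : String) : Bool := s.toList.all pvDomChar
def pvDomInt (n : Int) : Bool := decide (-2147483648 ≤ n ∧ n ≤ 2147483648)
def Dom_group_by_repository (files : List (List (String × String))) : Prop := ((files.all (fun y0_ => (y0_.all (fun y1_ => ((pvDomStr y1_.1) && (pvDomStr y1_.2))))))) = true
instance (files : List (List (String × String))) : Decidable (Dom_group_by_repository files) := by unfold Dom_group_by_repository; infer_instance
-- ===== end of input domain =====

-- B: dedup the distinct roots first, then build each group by filtering the file list per root (alternative two-stage algorithm; same return value).


-- ===== PORT A =====
-- file.get('root', '') on the association-list dict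
def pvRootOf (file : List (String × String)) : String :=
  (PySem.Dict.mk file).getD "root" ""

def group_by_repository (files : List (List (String × String))) : (List (String × List (List (String × String)))) × (List (String × List String)) :=
  let p := files.foldl
    (fun (acc : PySem.Dict String (List (List (String × String))) × PySem.Dict String (PySem.Set String)) file =>
      let repo_root := pvRootOf file
      (acc.1.modify repo_root [] (fun l => l ++ [file]),          -- files_by_root[repo_root].append(file)
       acc.2.modify repo_root PySem.Set.empty (fun s => PySem.Set.add s repo_root)))  -- scan_dirs_by_root[repo_root].add(repo_root)
    (PySem.Dict.empty, PySem.Dict.empty)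
  (p.1.items, p.2.items)

-- ===== PORT B =====
def group_by_repository_alt (files : List (List (String × String))) : (List (String × List (List (String × String)))) × (List (String × List String)) :=
  let roots := PySem.List.dedup (files.map pvRootOf)              -- list(dict.fromkeys(f.get('root','') for f in files))
  (roots.map (fun r => (r, files.filter (fun f => pvRootOf f == r))),  -- {r: [f for f in files if f.get('root','') == r] for r in roots}
   roots.map (fun r => (r, [r])))                                 -- {r: {r} for r in roots}

-- ===== PRECONDITION & SPEC =====
def Spec_group_by_repository (files : List (List (String × String))) (out : (List (String × List (List (String × String)))) × (List (String × List String))) : Prop := out = group_by_repository_alt files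
instance (files : List (List (String × String))) (out : (List (String × List (List (String × String)))) × (List (String × List String))) : Decidable (Spec_group_by_repository files out) := by unfold Spec_group_by_repository; infer_instance

-- ===== CLAIM (what is proved, stated in full; the proofs are below) =====
def Claim_equal_group_by_repository : Prop := ∀ (files : List (List (String × String))), Dom_group_by_repository files → Spec_group_by_repository files (group_by_repository files)

-- ===== LEMMAS AND PROOFS =====

-- d.modify unfolded (Python's d[k] = f(d.get(k, d0)))
theorem pv_modify_eq {κ ν : Type} [BEq κ] (d : PySem.Dict κ ν) (k : κ) (d0 : ν) (f : ν → ν) :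
    d.modify k d0 f = d.insert k (f (d.getD k d0)) := rfl

-- A's add-the-root-to-its-own-set loop keeps every set equal to the singleton of its key.
theorem pv_val_inv (files : List (List (String × String))) (d : PySem.Dict String (PySem.Set String))
    (h : ∀ k, k ∈ d.keys → d.getD k PySem.Set.empty = [k]) :
    ∀ k, k ∈ (files.foldl
        (fun d file => d.modify (pvRootOf file) PySem.Set.empty (fun s => PySem.Set.add s (pvRootOf file))) d).keys →
      (files.foldl
        (fun d file => d.modify (pvRootOf file) PySem.Set.empty (fun s => PySem.Set.add s (pvRootOf file))) d).getD k PySem.Set.empty = [k] := by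
  induction files generalizing d with
  | nil => exact h
  | cons f fs ih =>
    intro k hk
    refine ih _ ?_ k hk
    intro k' hk'
    simp only [pv_modify_eq] at hk' ⊢
    have hmem := (PySem.Dict.mem_keys_insert d (pvRootOf f) k' _).mp hk'
    by_cases hke : k' = pvRootOf f
    · rw [hke, PySem.Dict.getD_insert_self]
      by_cases hc : d.contains (pvRootOf f) = true
      · rw [h _ ((PySem.Dict.contains_iff_mem_keys d _).mp hc)]
        simp [PySem.Set.add, PySem.Set.contains]
      · rw [PySem.Dict.getD_of_not_contains d _ (by simpa using hc)]
        simp [PySem.Set.add, PySem.Set.contains, PySem.Set.empty]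
    · rw [PySem.Dict.getD_insert_of_ne d _ _ hke]
      exact h k' (hmem.resolve_left hke)

-- ===== VERDICT (by name: the statement is the Claim_ definition above) =====
theorem group_by_repository_spec : Claim_equal_group_by_repository := by
  intro files _
  show _ = _
  simp only [group_by_repository, group_by_repository_alt]
  rw [PySem.List.foldl_prod_mk
      (fun (d : PySem.Dict String (List (List (String × String)))) file =>
        d.modify (pvRootOf file) [] (fun l => l ++ [file]))
      (fun (d : PySem.Dict String (PySem.Set String)) file =>
        d.modify (pvRootOf file) PySem.Set.empty (fun s => PySem.Set.add s (pvRootOf file)))]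
  have hroots : PySem.List.dedup (files.map pvRootOf)
      = PySem.Set.update PySem.Set.empty (files.map pvRootOf) := by
    simp [PySem.List.dedup_eq_ofList, PySem.Set.ofList, PySem.Set.update, PySem.Set.empty]
  have hkA : (files.foldl
      (fun (d : PySem.Dict String (List (List (String × String)))) file =>
        d.modify (pvRootOf file) [] (fun l => l ++ [file])) PySem.Dict.empty).keys
      = PySem.Set.update PySem.Dict.empty.keys (files.map pvRootOf) :=
    PySem.Dict.keys_foldl_modify_key files pvRootOf [] _ PySem.Dict.empty
  have hkS : (files.foldl
      (fun d file => d.modify (pvRootOf file) PySem.Set.empty (fun s => PySem.Set.add s (pvRootOf file)))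
      PySem.Dict.empty).keys = PySem.Set.update PySem.Dict.empty.keys (files.map pvRootOf) :=
    PySem.Dict.keys_foldl_modify_key files pvRootOf PySem.Set.empty _ PySem.Dict.empty
  have hndA : (files.foldl
      (fun (d : PySem.Dict String (List (List (String × String)))) file =>
        d.modify (pvRootOf file) [] (fun l => l ++ [file])) PySem.Dict.empty).keys.Nodup :=
    PySem.Dict.nodup_keys_foldl_modify_key files pvRootOf [] _ PySem.Dict.empty (by simp)
  have hndS : (files.foldl
      (fun d file => d.modify (pvRootOf file) PySem.Set.empty (fun s => PySem.Set.add s (pvRootOf file)))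
      PySem.Dict.empty).keys.Nodup :=
    PySem.Dict.nodup_keys_foldl_modify_key files pvRootOf PySem.Set.empty _ PySem.Dict.empty (by simp)
  refine Prod.ext ?_ ?_
  · -- files dict: items = roots.map (r, files.filter …)
    dsimp only
    rw [PySem.Dict.items_eq_map_keys _ hndA [], hkA]
    simp only [PySem.Dict.keys_empty]
    rw [show PySem.Set.update ([] : List String) (files.map pvRootOf)
        = PySem.List.dedup (files.map pvRootOf) from (by rw [hroots]; rfl)]
    apply List.map_congr_left
    intro k _
    refine congrArg (fun v => (k, v)) ?_
    have := PySem.Dict.getD_foldl_modify_append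
      (files.map (fun f => (pvRootOf f, f))) (PySem.Dict.empty) k
    rw [List.foldl_map] at this
    rw [this]
    simp [List.filter_map, Function.comp_def]
  · -- scan-dir dict: items = roots.map (r, [r])
    dsimp only
    rw [PySem.Dict.items_eq_map_keys _ hndS PySem.Set.empty, hkS]
    simp only [PySem.Dict.keys_empty]
    rw [show PySem.Set.update ([] : List String) (files.map pvRootOf)
        = PySem.List.dedup (files.map pvRootOf) from (by rw [hroots]; rfl)]
    apply List.map_congr_left
    intro k hk
    refine congrArg (fun v => (k, v)) ?_
    apply pv_val_inv files PySem.Dict.empty (by simp [PySem.Dict.keys_empty])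
    rw [hkS]
    simpa [PySem.Dict.keys_empty, hroots] using hk
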